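-- pv_equiv track=rewrite | github.com/radumarinoiu/ArchHubQt | src/archhub/core/parsing/pkgbuild.py | _parse_array_content
-- ===== SOURCE A (Python) =====
-- from typing import List, Optional
--
-- def _parse_array_content(inner: str) -> List[str]:
--     """Parse array inner (space-separated, quoted items allowed)."""
--     result: List[str] = []
--     inner = inner.strip()
--     if not inner:
--         return result
--     # Simple approach: split by whitespace but respect quotes
--     current = []
--     in_quote = None
--     for c in inner:
--         if in_quote:
--             if c == in_quote:
--                 in_quote = None
--                 result.append("".join(current).strip())
--                 current = []
--             else:
--                 current.append(c)
--         elif c in ("'", '"'):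
--             in_quote = c
--             if current:
--                 result.append("".join(current).strip())
--                 current = []
--         elif c in (" ", "\t", "\n"):
--             if current:
--                 result.append("".join(current).strip())
--                 current = []
--         else:
--             current.append(c)
--     if current:
--         result.append("".join(current).strip())
--     return [x for x in result if x]
-- ===== SOURCE B (Python) =====
-- from typing import List
--
-- def _parse_array_content(inner: str) -> List[str]:
--     """Parse array inner (space-separated, quoted items allowed)."""
--     cs = inner.strip()
--     n = len(cs)
--     toks: List[str] = []
--     i = 0
--     while i < n:
--         c = cs[i]
--         if c in " \t\n":
--             i += 1
--         elif c in "'\"":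
--             j = i + 1
--             while j < n and cs[j] != c:
--                 j += 1
--             toks.append(cs[i + 1:j].strip())
--             i = j + 1
--         else:
--             j = i
--             while j < n and cs[j] not in " \t\n'\"":
--                 j += 1
--             toks.append(cs[i:j].strip())
--             i = j
--     return [t for t in toks if t]
-- ===== Notes on version B (the rewrite author's own statement) =====
-- stated objective: alternative
-- what changed: Replaced A's char-by-char state machine (in_quote flag plus a growing current-chars accumulator) with an index-jumping tokenizer that, at each token start, scans ahead to the token's end and slices the whole token out in one step.
import Mathlib
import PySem

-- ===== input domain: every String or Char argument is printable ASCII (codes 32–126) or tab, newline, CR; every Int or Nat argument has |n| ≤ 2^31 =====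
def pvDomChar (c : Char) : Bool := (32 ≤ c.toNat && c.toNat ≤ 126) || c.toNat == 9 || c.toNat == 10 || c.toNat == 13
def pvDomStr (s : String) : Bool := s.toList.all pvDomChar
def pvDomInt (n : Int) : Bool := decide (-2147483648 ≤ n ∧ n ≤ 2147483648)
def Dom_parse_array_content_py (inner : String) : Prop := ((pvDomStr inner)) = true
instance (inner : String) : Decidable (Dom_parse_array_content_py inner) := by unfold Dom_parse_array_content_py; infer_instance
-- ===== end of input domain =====

-- B replaces A's char-by-char state machine (in_quote flag + current accumulator) by an
-- index-jumping tokenizer that scans ahead to each token's end and slices it out; alternative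
-- decomposition, same cost.

-- ===== PORT A =====
-- one step of A's for-loop; state = (result, current, in_quote)
def pvAStep (st : List String × List Char × Option Char) (c : Char) :
    List String × List Char × Option Char :=
  match st with
  | (result, current, some q) =>
      if c = q then (result ++ [String.ofList (PySem.Chars.strip current)], [], none)
      else (result, current ++ [c], some q)
  | (result, current, none) =>
      if c = '\'' ∨ c = '"' then
        ((if current ≠ [] then result ++ [String.ofList (PySem.Chars.strip current)] else result),
          [], some c)
      else if c = ' ' ∨ c = '\t' ∨ c = '\n' then
        ((if current ≠ [] then result ++ [String.ofList (PySem.Chars.strip current)] else result),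
          [], none)
      else (result, current ++ [c], none)

def parse_array_content_py (inner : String) : List String :=
  let s := PySem.Str.strip inner
  if s = "" then []
  else
    let st := s.toList.foldl pvAStep ([], [], none)
    let result := if st.2.1 ≠ [] then st.1 ++ [String.ofList (PySem.Chars.strip st.2.1)] else st.1
    result.filter (fun x => x ≠ "")

-- ===== PORT B =====
def pvIsDelim (c : Char) : Bool := c == ' ' || c == '\t' || c == '\n'
def pvIsQuote (c : Char) : Bool := c == '\'' || c == '"'
def pvIsWord (c : Char) : Bool := !(pvIsDelim c || pvIsQuote c)

-- "while j < n and p(cs[j]): j += 1"  (fuel = a totality guard; n - start steps always suffice)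
def pvScanEnd (cs : List Char) (p : Char → Bool) : Nat → Nat → Nat
  | 0, j => j
  | fuel + 1, j => if j < cs.length ∧ p (cs.getD j ' ') then pvScanEnd cs p fuel (j + 1) else j

-- cs[a:b].strip() for nat indices a ≤ b (an in-range Python slice = drop then take)
def pvTok (l : List Char) (k : Nat) : String := String.ofList (PySem.Chars.strip (l.take k))

-- B's main while-loop over the index i (fuel = a totality guard; n + 1 - i steps always suffice)
def pvBLoop (cs : List Char) : Nat → Nat → List String
  | 0, _ => []
  | fuel + 1, i =>
    if i < cs.length then
      if pvIsDelim (cs.getD i ' ') then pvBLoop cs fuel (i + 1)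
      else if pvIsQuote (cs.getD i ' ') then
        let j := pvScanEnd cs (fun x => x != cs.getD i ' ') (cs.length - (i + 1)) (i + 1)
        pvTok (cs.drop (i + 1)) (j - (i + 1)) :: pvBLoop cs fuel (j + 1)
      else
        let j := pvScanEnd cs pvIsWord (cs.length - i) i
        pvTok (cs.drop i) (j - i) :: pvBLoop cs fuel j
    else []

def parse_array_content_py_alt (inner : String) : List String :=
  (pvBLoop (PySem.Str.strip inner).toList ((PySem.Str.strip inner).toList.length + 1) 0).filter
    (fun t => t ≠ "")

-- ===== PRECONDITION & SPEC =====
def Spec_parse_array_content_py (inner : String) (out : List String) : Prop := out = parse_array_content_py_alt inner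
instance (inner : String) (out : List String) : Decidable (Spec_parse_array_content_py inner out) := by unfold Spec_parse_array_content_py; infer_instance

-- ===== CLAIM (what is proved, stated in full; the proofs are below) =====
def Claim_equal_parse_array_content_py : Prop := ∀ (inner : String), Dom_parse_array_content_py inner → Spec_parse_array_content_py inner (parse_array_content_py inner)

-- ===== LEMMAS AND PROOFS =====

theorem pvGetD (cs : List Char) {j : Nat} (h : j < cs.length) : cs.getD j ' ' = cs[j] := by
  simp [List.getD_eq_getElem?_getD, List.getElem?_eq_getElem h]

theorem pvTakeLen (p : Char → Bool) (l : List Char) :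
    l.take (l.takeWhile p).length = l.takeWhile p := by
  induction l with
  | nil => simp
  | cons c t ih => by_cases h : p c <;> simp [List.takeWhile_cons, h, ih]

theorem pvDropLen (p : Char → Bool) (l : List Char) :
    l.drop (l.takeWhile p).length = l.dropWhile p := by
  induction l with
  | nil => simp
  | cons c t ih => by_cases h : p c <;> simp [List.takeWhile_cons, List.dropWhile_cons, h, ih]

theorem pvDropWhileHead (p : Char → Bool) (l : List Char) (r : Char) (rest' : List Char)
    (h : l.dropWhile p = r :: rest') : p r = false := by
  induction l with
  | nil => simp at h
  | cons c t ih =>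
    rw [List.dropWhile_cons] at h
    by_cases hc : p c = true
    · rw [if_pos hc] at h; exact ih h
    · rw [if_neg hc] at h
      injection h with h1 _
      rw [← h1]
      simpa using hc

theorem pvScanEnd_ge (cs : List Char) (p : Char → Bool) :
    ∀ (fuel j : Nat), j ≤ pvScanEnd cs p fuel j := by
  intro fuel
  induction fuel with
  | zero => intro j; simp [pvScanEnd]
  | succ f ih =>
    intro j
    simp only [pvScanEnd]
    by_cases h : j < cs.length ∧ p (cs.getD j ' ') = true
    · rw [if_pos h]; exact le_trans (by omega) (ih (j + 1))
    · rw [if_neg h]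

theorem pvScanEnd_gt (cs : List Char) (p : Char → Bool) (fuel i : Nat)
    (hf : 1 ≤ fuel) (h : i < cs.length) (hp : p (cs.getD i ' ') = true) :
    i < pvScanEnd cs p fuel i := by
  obtain ⟨f, rfl⟩ : ∃ f, fuel = f + 1 := ⟨fuel - 1, by omega⟩
  simp only [pvScanEnd]
  rw [if_pos ⟨h, hp⟩]
  exact lt_of_lt_of_le (by omega) (pvScanEnd_ge cs p f (i + 1))

theorem pvScanEnd_eq (cs : List Char) (p : Char → Bool) :
    ∀ (fuel j : Nat), cs.length - j ≤ fuel →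
    pvScanEnd cs p fuel j = j + ((cs.drop j).takeWhile p).length := by
  intro fuel
  induction fuel with
  | zero =>
    intro j hj
    simp only [pvScanEnd]
    rw [List.drop_eq_nil_of_le (by omega)]
    simp
  | succ f ih =>
    intro j hj
    simp only [pvScanEnd]
    by_cases h : j < cs.length ∧ p (cs.getD j ' ') = true
    · rw [if_pos h, ih (j + 1) (by omega)]
      have hp : p cs[j] = true := by rw [← pvGetD cs h.1]; exact h.2
      rw [List.drop_eq_getElem_cons h.1, List.takeWhile_cons_of_pos hp]
      simp; omega
    · rw [if_neg h]
      by_cases hlt : j < cs.length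
      · have hp : ¬ p cs[j] = true := by rw [← pvGetD cs hlt]; tauto
        rw [List.drop_eq_getElem_cons hlt, List.takeWhile_cons_of_neg hp]
        simp
      · rw [List.drop_eq_nil_of_le (by omega)]; simp

-- proof-side structural tokenizer both ports are reduced to
def pvBTok : List Char → List String
  | [] => []
  | c :: rest =>
    if pvIsDelim c then pvBTok rest
    else if hq : pvIsQuote c then
      String.ofList (PySem.Chars.strip (rest.takeWhile (· != c))) ::
        pvBTok ((rest.dropWhile (· != c)).drop 1)
    else
      String.ofList (PySem.Chars.strip ((c :: rest).takeWhile pvIsWord)) ::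
        pvBTok ((c :: rest).dropWhile pvIsWord)
termination_by cs => cs.length
decreasing_by
  · simp
  · have := List.length_dropWhile_le (p := (· != c)) (l := rest)
    simp; omega
  · have hw : pvIsWord c = true := by
      simp [pvIsWord] at *; simp_all
    have := List.length_dropWhile_le (p := pvIsWord) (l := rest)
    simp [List.dropWhile, hw]; omega

theorem pvBLoop_eq (cs : List Char) :
    ∀ (fuel i : Nat), cs.length - i < fuel → pvBLoop cs fuel i = pvBTok (cs.drop i) := by
  intro fuel
  induction fuel with
  | zero => intro i hi; exact absurd hi (by omega)
  | succ f ih =>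
    intro i hi
    by_cases hlt : i < cs.length
    · have hdrop := List.drop_eq_getElem_cons hlt
      simp only [pvBLoop]
      rw [if_pos hlt, pvGetD cs hlt]
      by_cases hd : pvIsDelim cs[i] = true
      · rw [if_pos hd, ih (i + 1) (by omega), hdrop]
        simp only [pvBTok]
        rw [if_pos hd]
      · by_cases hq : pvIsQuote cs[i] = true
        · rw [if_neg hd, if_pos hq]
          have hjE := pvScanEnd_eq cs (fun x => x != cs[i]) (cs.length - (i + 1)) (i + 1) (by omega)
          set L := ((cs.drop (i + 1)).takeWhile (fun x => x != cs[i])).length with hL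
          set j := pvScanEnd cs (fun x => x != cs[i]) (cs.length - (i + 1)) (i + 1) with hjdef
          have htok : pvTok (cs.drop (i + 1)) (j - (i + 1)) =
              String.ofList (PySem.Chars.strip ((cs.drop (i + 1)).takeWhile (fun x => x != cs[i]))) := by
            rw [pvTok, show j - (i + 1) = L from by omega, hL, pvTakeLen]
          have htail : cs.drop (j + 1) = ((cs.drop (i + 1)).dropWhile (fun x => x != cs[i])).drop 1 := by
            rw [← pvDropLen, ← hL]
            rw [List.drop_drop, List.drop_drop]
            congr 1 <;> omega
          show pvTok (cs.drop (i + 1)) (j - (i + 1)) :: pvBLoop cs f (j + 1) =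
            pvBTok (cs.drop i)
          rw [htok, ih (j + 1) (by omega), htail, hdrop]
          simp only [pvBTok]
          rw [if_neg hd, dif_pos hq]
        · rw [if_neg hd, if_neg hq]
          have hw : pvIsWord cs[i] = true := by
            simp [pvIsWord] at hd hq ⊢; simp [hd, hq]
          have hjE := pvScanEnd_eq cs pvIsWord (cs.length - i) i (by omega)
          set L := ((cs.drop i).takeWhile pvIsWord).length with hL
          set j := pvScanEnd cs pvIsWord (cs.length - i) i with hjdef
          have hgt : i < j :=
            pvScanEnd_gt cs pvIsWord (cs.length - i) i (by omega) hlt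
              (by rw [pvGetD cs hlt]; exact hw)
          have htok : pvTok (cs.drop i) (j - i) =
              String.ofList (PySem.Chars.strip ((cs.drop i).takeWhile pvIsWord)) := by
            rw [pvTok, show j - i = L from by omega, hL, pvTakeLen]
          have htail : cs.drop j = (cs.drop i).dropWhile pvIsWord := by
            rw [← pvDropLen, ← hL, List.drop_drop]
            congr 1 <;> omega
          show pvTok (cs.drop i) (j - i) :: pvBLoop cs f j = pvBTok (cs.drop i)
          rw [htok, ih j (by omega), htail]
          conv_rhs => rw [hdrop]
          simp only [pvBTok]
          rw [if_neg hd, dif_neg hq]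
          rw [← hdrop]
    · simp only [pvBLoop]
      rw [if_neg hlt, List.drop_eq_nil_of_le (by omega)]
      simp [pvBTok]

-- A-side abbreviations (definitionally the tail of port A's body)
def pvFinish (st : List String × List Char × Option Char) : List String :=
  if st.2.1 ≠ [] then st.1 ++ [String.ofList (PySem.Chars.strip st.2.1)] else st.1

def pvFilt (l : List String) : List String := l.filter (fun x => x ≠ "")

theorem pvFilt_append (a b : List String) : pvFilt (a ++ b) = pvFilt a ++ pvFilt b := by
  simp [pvFilt]

-- character-class facts
theorem pvDelimChar (c : Char) (h : pvIsDelim c = true) :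
    (c = ' ' ∨ c = '\t' ∨ c = '\n') ∧ ¬(c = '\'' ∨ c = '"') := by
  simp [pvIsDelim] at h
  constructor
  · tauto
  · rintro (rfl | rfl) <;> rcases h with (h | h) | h <;> exact absurd h (by decide)

theorem pvQuoteChar (c : Char) (h : pvIsQuote c = true) : c = '\'' ∨ c = '"' := by
  simpa [pvIsQuote] using h

theorem pvWordChar (c : Char) (h : pvIsWord c = true) :
    ¬(c = '\'' ∨ c = '"') ∧ ¬(c = ' ' ∨ c = '\t' ∨ c = '\n') := by
  simp [pvIsWord, pvIsDelim, pvIsQuote] at h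
  tauto

-- A's fold inside a quote, closing quote present
theorem pvQuoteRun (q : Char) (inside : List Char) :
    ∀ (rest : List Char) (res : List String) (cur : List Char), (∀ x ∈ inside, x ≠ q) →
    List.foldl pvAStep (res, cur, some q) (inside ++ q :: rest) =
      List.foldl pvAStep (res ++ [String.ofList (PySem.Chars.strip (cur ++ inside))], [], none) rest := by
  induction inside with
  | nil => intro rest res cur _; simp [pvAStep]
  | cons c t ih =>
    intro rest res cur h
    have hc : c ≠ q := h c (by simp)
    simp only [List.cons_append, List.foldl_cons]
    rw [show pvAStep (res, cur, some q) c = (res, cur ++ [c], some q) from by simp [pvAStep, hc]]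
    rw [ih rest res (cur ++ [c]) (fun x hx => h x (by simp [hx]))]
    have : (cur ++ [c]) ++ t = cur ++ (c :: t) := by simp
    rw [this]

-- A's fold inside a quote never closed
theorem pvQuoteRunOpen (q : Char) (inside : List Char) :
    ∀ (res : List String) (cur : List Char), (∀ x ∈ inside, x ≠ q) →
    List.foldl pvAStep (res, cur, some q) inside = (res, cur ++ inside, some q) := by
  induction inside with
  | nil => intro res cur _; simp
  | cons c t ih =>
    intro res cur h
    have hc : c ≠ q := h c (by simp)
    simp only [List.foldl_cons]
    rw [show pvAStep (res, cur, some q) c = (res, cur ++ [c], some q) from by simp [pvAStep, hc]]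
    rw [ih res (cur ++ [c]) (fun x hx => h x (by simp [hx]))]
    simp

-- A's fold over a run of word characters just accumulates them
theorem pvWordRun (w : List Char) :
    ∀ (res : List String) (cur : List Char), (∀ x ∈ w, pvIsWord x = true) →
    List.foldl pvAStep (res, cur, none) w = (res, cur ++ w, none) := by
  induction w with
  | nil => intro res cur _; simp
  | cons c t ih =>
    intro res cur h
    have hc := pvWordChar c (h c (by simp))
    simp only [List.foldl_cons]
    rw [show pvAStep (res, cur, none) c = (res, cur ++ [c], none) from by
      simp [pvAStep, hc.1, hc.2]]
    rw [ih res (cur ++ [c]) (fun x hx => h x (by simp [hx]))]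
    simp

-- main: A's state machine, filtered, produces exactly B's (filtered) token list
theorem pvMain : ∀ (n : Nat) (cs : List Char), cs.length ≤ n → ∀ res : List String,
    pvFilt (pvFinish (List.foldl pvAStep (res, [], none) cs)) =
      pvFilt res ++ pvFilt (pvBTok cs) := by
  intro n
  induction n with
  | zero =>
    intro cs h res
    match cs with
    | [] => simp [pvBTok, pvFinish, pvFilt]
    | c :: t => simp at h
  | succ n ih =>
    intro cs hlen res
    match cs with
    | [] => simp [pvBTok, pvFinish, pvFilt]
    | c :: t =>
      have hlen' : t.length ≤ n := by simpa using hlen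
      by_cases hd : pvIsDelim c = true
      · have h1 := pvDelimChar c hd
        rw [List.foldl_cons,
          show pvAStep (res, [], none) c = (res, [], none) from by simp [pvAStep, h1.1, h1.2],
          ih t hlen' res]
        simp only [pvBTok]
        rw [if_pos hd]
      · by_cases hq : pvIsQuote c = true
        · have hcq := pvQuoteChar c hq
          rw [List.foldl_cons,
            show pvAStep (res, [], none) c = (res, [], some c) from by simp [pvAStep, hcq]]
          have hsplit := List.takeWhile_append_dropWhile (p := (· != c)) (l := t)
          set inside := t.takeWhile (· != c) with hin
          set r0 := t.dropWhile (· != c) with hr0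
          have hins : ∀ x ∈ inside, x ≠ c := fun x hx => by
            have := List.mem_takeWhile_imp hx; simpa using this
          cases hr0c : r0 with
          | nil =>
            have ht : t = inside := by rw [← hsplit, hr0c]; simp
            rw [show List.foldl pvAStep (res, [], some c) t = (res, inside, some c) from by
              rw [ht]; exact pvQuoteRunOpen c inside res [] hins]
            simp only [pvBTok]
            rw [if_neg hd, dif_pos hq, ← hin, ← hr0, hr0c]
            by_cases hI : inside = []
            · rw [hI]
              simp [pvFinish, pvFilt, pvBTok]
              decide
            · rw [show pvFinish (res, inside, some c) =
                res ++ [String.ofList (PySem.Chars.strip inside)] from by simp [pvFinish, hI]]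
              rw [pvFilt_append]
              simp [pvBTok, pvFilt]
          | cons r rest' =>
            have hrc : r = c := by
              have := pvDropWhileHead (· != c) t r rest' (by rw [← hr0, hr0c])
              simpa using this
            have ht : t = inside ++ c :: rest' := by rw [← hsplit, hr0c, hrc]
            have hlr : rest'.length ≤ n := by
              have : t.length = inside.length + 1 + rest'.length := by rw [ht]; simp; omega
              omega
            rw [show List.foldl pvAStep (res, [], some c) t =
                List.foldl pvAStep (res ++ [String.ofList (PySem.Chars.strip inside)], [], none) rest' from by
              rw [ht]
              have := pvQuoteRun c inside rest' res [] hins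
              simpa using this]
            rw [ih rest' hlr, pvFilt_append]
            simp only [pvBTok]
            rw [if_neg hd, dif_pos hq, ← hin, ← hr0, hr0c]
            simp only [List.drop_succ_cons, List.drop_zero]
            by_cases hx : String.ofList (PySem.Chars.strip inside) = "" <;>
              simp [pvFilt, List.filter_cons, hx, List.append_assoc]
        · -- word run
          have hd' : pvIsDelim c = false := by simpa using hd
          have hq' : pvIsQuote c = false := by simpa using hq
          have hw : pvIsWord c = true := by simp [pvIsWord, hd', hq']
          set w := (c :: t).takeWhile pvIsWord with hwdef
          set r0 := (c :: t).dropWhile pvIsWord with hr0def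
          have hsplit : w ++ r0 = c :: t := List.takeWhile_append_dropWhile
          have hwall : ∀ x ∈ w, pvIsWord x = true := fun x hx => List.mem_takeWhile_imp hx
          have hwc : w = c :: t.takeWhile pvIsWord := by
            rw [hwdef, List.takeWhile_cons_of_pos hw]
          have hwne : w ≠ [] := by rw [hwc]; simp
          have hr0t : r0 = t.dropWhile pvIsWord := by
            rw [hr0def, List.dropWhile_cons_of_pos hw]
          rw [show List.foldl pvAStep (res, [], none) (c :: t) =
              List.foldl pvAStep (res, w, none) r0 from by
            rw [← hsplit, List.foldl_append, pvWordRun w res [] hwall]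
            simp]
          have hstep : pvFilt (pvFinish (List.foldl pvAStep (res, w, none) r0)) =
              pvFilt (pvFinish (List.foldl pvAStep
                (res ++ [String.ofList (PySem.Chars.strip w)], [], none) r0)) := by
            cases hr0c : r0 with
            | nil => simp [pvFinish, hwne]
            | cons r rest' =>
              have hr : pvIsWord r = false := pvDropWhileHead pvIsWord t r rest' (by rw [← hr0t, hr0c])
              have hr2 : pvIsDelim r = true ∨ pvIsQuote r = true := by
                rw [pvIsWord] at hr
                have h3 : (pvIsDelim r || pvIsQuote r) = true := by
                  cases h4 : (pvIsDelim r || pvIsQuote r)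
                  · rw [h4] at hr; simp at hr
                  · rfl
                rcases Bool.or_eq_true _ _ |>.mp h3 with h | h
                · exact Or.inl h
                · exact Or.inr h
              simp only [List.foldl_cons]
              rcases hr2 with h | h
              · have h1 := pvDelimChar r h
                rw [show pvAStep (res, w, none) r =
                    (res ++ [String.ofList (PySem.Chars.strip w)], [], none) from by
                  simp [pvAStep, h1.1, h1.2, hwne]]
                rw [show pvAStep (res ++ [String.ofList (PySem.Chars.strip w)], [], none) r =
                    (res ++ [String.ofList (PySem.Chars.strip w)], [], none) from by
                  simp [pvAStep, h1.1, h1.2]]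
              · have h1 := pvQuoteChar r h
                rw [show pvAStep (res, w, none) r =
                    (res ++ [String.ofList (PySem.Chars.strip w)], [], some r) from by
                  simp [pvAStep, h1, hwne]]
                rw [show pvAStep (res ++ [String.ofList (PySem.Chars.strip w)], [], none) r =
                    (res ++ [String.ofList (PySem.Chars.strip w)], [], some r) from by
                  simp [pvAStep, h1]]
          have hlr0 : r0.length ≤ n := by
            have h1 : w.length + r0.length = t.length + 1 := by
              rw [← List.length_append, hsplit]; simp
            have h2 : 1 ≤ w.length := by rw [hwc]; simp
            omega
          rw [hstep, ih r0 hlr0, pvFilt_append]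
          simp only [pvBTok]
          rw [if_neg hd, dif_neg hq, ← hwdef, ← hr0def]
          by_cases hx : String.ofList (PySem.Chars.strip w) = "" <;>
            simp [pvFilt, List.filter_cons, hx, List.append_assoc]

-- ===== VERDICT (by name: the statement is the Claim_ definition above) =====
theorem parse_array_content_py_spec : Claim_equal_parse_array_content_py := by
  unfold Claim_equal_parse_array_content_py Spec_parse_array_content_py
  intro inner _
  by_cases hs : PySem.Str.strip inner = ""
  · simp only [parse_array_content_py, parse_array_content_py_alt, hs]
    rfl
  · have hA : parse_array_content_py inner =
        pvFilt (pvFinish (List.foldl pvAStep ([], [], none) (PySem.Str.strip inner).toList)) := by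
      simp only [parse_array_content_py, hs, if_false, pvFilt, pvFinish]
    have hB : parse_array_content_py_alt inner =
        pvFilt (pvBTok (PySem.Str.strip inner).toList) := by
      simp only [parse_array_content_py_alt, pvFilt]
      rw [pvBLoop_eq _ _ 0 (by omega), List.drop_zero]
    rw [hA, hB, pvMain (PySem.Str.strip inner).toList.length _ le_rfl []]
    simp [pvFilt]
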